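-- pv_equiv track=rewrite | github.com/ckoons/BubbleSpacetimeTheory | play/toy_292_adaptive_conservation.py | score_lookahead
-- ===== SOURCE A (Python) =====
-- def up(clauses, n, assign):
--     """Unit propagation. Returns (assignment_dict, contradiction_bool)."""
--     a = dict(assign)
--     changed = True
--     while changed:
--         changed = False
--         for cl in clauses:
--             unset = []
--             sat = False
--             for lit in cl:
--                 v = abs(lit)
--                 if v in a:
--                     if (lit > 0) == a[v]:
--                         sat = True
--                         break
--                 else:
--                     unset.append(lit)
--             if sat:
--                 continue
--             if len(unset) == 0:
--                 return a, True
--             if len(unset) == 1: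
--                 lit = unset[0]
--                 v = abs(lit)
--                 if v not in a:
--                     a[v] = (lit > 0)
--                     changed = True
--     return a, False
--
-- def score_lookahead(clauses, n, current_assign):
--     """Score = max cascade from forcing this variable either way."""
--     scores = {}
--     for v in range(1, n + 1):
--         if v in current_assign:
--             continue
--         best = 0
--         for val in [True, False]:
--             a, c = up(clauses, n, {**current_assign, v: val})
--             if c:
--                 # Contradiction = we learn v must be the OTHER value
--                 # That's maximally informative
--                 best = n
--                 break
--             best = max(best, len(a) - len(current_assign) - 1)
--         scores[v] = best
--     return scores
-- ===== SOURCE B (Python) =====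
-- def _classify(cl, a):
--     """Scan one clause: 'sat' | 'conflict' | 'big' (>=2 unassigned) | ('unit', lit)."""
--     first = None
--     for lit in cl:
--         b = a.get(abs(lit))
--         if b is None:
--             if first is None:
--                 first = lit
--             else:
--                 return 'big', 0
--         elif b == (lit > 0):
--             return 'sat', 0
--     if first is None:
--         return 'conflict', 0
--     return 'unit', first
--
--
-- def _propagate(clauses, occ, base, v, val):
--     """Worklist unit propagation from base + {v: val}.
--     Returns the final assignment dict, or None on contradiction."""
--     a = dict(base)
--     a[v] = val
--     work = list(range(len(clauses)))
--     idx = 0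
--     while idx < len(work):
--         i = work[idx]
--         idx += 1
--         status, lit = _classify(clauses[i], a)
--         if status == 'conflict':
--             return None
--         if status == 'unit':
--             w = abs(lit)
--             a[w] = (lit > 0)
--             # only clauses containing w can change status
--             work.extend(occ.get(w, []))
--     return a
--
--
-- def _best(clauses, occ, base, n, v):
--     at = _propagate(clauses, occ, base, v, True)
--     if at is None:
--         return n
--     af = _propagate(clauses, occ, base, v, False)
--     if af is None:
--         return n
--     return max(0, len(at) - len(base) - 1, len(af) - len(base) - 1)
--
--
-- def score_lookahead(clauses, n, current_assign):
--     """Score = max cascade from forcing this variable either way."""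
--     occ = {}
--     for i, cl in enumerate(clauses):
--         for lit in cl:
--             occ.setdefault(abs(lit), []).append(i)
--     scores = {}
--     for v in range(1, n + 1):
--         if v in current_assign:
--             continue
--         scores[v] = _best(clauses, occ, current_assign, n, v)
--     return scores
-- ===== Notes on version B (the rewrite author's own statement) =====
-- stated objective: alternative
-- what changed: A recomputes every clause in repeated full fixpoint sweeps until nothing changes; B builds a literal-to-clause occurrence index once and runs worklist (queue) unit propagation, re-examining only the clauses containing a newly assigned variable (intended to cut re-scanning; timing runs read ~1.7-2.4x but did not confirm it at every size).
import Mathlib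
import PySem

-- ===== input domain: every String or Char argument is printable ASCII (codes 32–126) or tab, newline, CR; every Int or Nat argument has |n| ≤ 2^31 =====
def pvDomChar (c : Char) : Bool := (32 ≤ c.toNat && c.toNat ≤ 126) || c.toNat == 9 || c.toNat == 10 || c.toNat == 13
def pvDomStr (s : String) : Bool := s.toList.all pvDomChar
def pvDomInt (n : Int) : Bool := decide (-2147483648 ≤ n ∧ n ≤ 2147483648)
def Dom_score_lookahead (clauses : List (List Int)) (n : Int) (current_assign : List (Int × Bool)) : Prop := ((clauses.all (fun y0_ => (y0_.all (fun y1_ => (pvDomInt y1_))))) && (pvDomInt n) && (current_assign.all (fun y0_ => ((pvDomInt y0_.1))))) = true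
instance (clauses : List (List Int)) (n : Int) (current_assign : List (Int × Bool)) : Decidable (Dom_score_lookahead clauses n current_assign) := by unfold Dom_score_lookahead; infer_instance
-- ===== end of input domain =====

-- B replaces A's repeated full fixpoint sweeps over all clauses by worklist unit
-- propagation with a literal-to-clause occurrence index, so only clauses containing a
-- newly assigned variable are re-examined (objective: alternative engine, same results).

-- ===== PORT A =====

-- the inner `for lit in cl` loop of `up` (collects unset literals, breaks on a satisfied one)
def pvA_scan (a : PySem.Dict Int Bool) : List Int → List Int → (List Int × Bool)
  | unset, [] => (unset, false)
  | unset, lit :: rest =>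
    match PySem.Dict.get? a |lit| with
    | some b => if decide (lit > 0) == b then (unset, true) else pvA_scan a unset rest
    | none => pvA_scan a (unset ++ [lit]) rest

-- one `for cl in clauses` pass of `up`; result = (a, changed, conflict)
def pvA_pass (a : PySem.Dict Int Bool) (c : Bool) : List (List Int) → (PySem.Dict Int Bool × Bool × Bool)
  | [] => (a, c, false)
  | cl :: rest =>
    match pvA_scan a [] cl with
    | (_, true) => pvA_pass a c rest
    | (unset, false) =>
      if unset.length = 0 then (a, c, true)
      else if unset.length = 1 then
        let lit := unset.headI
        if (PySem.Dict.get? a |lit|).isNone then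
          pvA_pass (PySem.Dict.insert a |lit| (decide (lit > 0))) true rest
        else pvA_pass a c rest
      else pvA_pass a c rest

-- variables occurring in the clause set (termination measure support)
def pvVars (clauses : List (List Int)) : List Int := (clauses.flatten.map (fun l => |l|)).dedup

-- number of clause variables not yet assigned (termination measure)
def pvFree (clauses : List (List Int)) (a : PySem.Dict Int Bool) : Nat :=
  ((pvVars clauses).filter (fun v => (PySem.Dict.get? a v).isNone)).length

lemma pvFilter_le {α : Type} (p p' : α → Bool) (himp : ∀ y, p' y = true → p y = true) :
    ∀ l : List α, (l.filter p').length ≤ (l.filter p).length := by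
  intro l
  induction l with
  | nil => simp
  | cons y t ih =>
    simp only [List.filter_cons]
    cases h1 : p' y
    · cases h2 : p y <;> simp <;> omega
    · rw [himp y h1]; simp; omega

lemma pvFilter_lt {α : Type} (p p' : α → Bool) (x : α) :
    ∀ l : List α, x ∈ l → p x = true → p' x = false → (∀ y, p' y = true → p y = true) →
    (l.filter p').length < (l.filter p).length := by
  intro l
  induction l with
  | nil => intro h; cases h
  | cons y t ih =>
    intro hx hp hp' himp
    rcases List.mem_cons.mp hx with rfl | hxt
    · simp only [List.filter_cons, hp, hp']
      have := pvFilter_le p p' himp t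
      simp; omega
    · have hiht := ih hxt hp hp' himp
      simp only [List.filter_cons]
      cases h1 : p' y
      · cases h2 : p y <;> simp <;> omega
      · rw [himp y h1]; simp; omega

lemma pvFree_insert_lt (clauses : List (List Int)) (a : PySem.Dict Int Bool) (w : Int) (b : Bool)
    (hw : w ∈ pvVars clauses) (hn : PySem.Dict.get? a w = none) :
    pvFree clauses (PySem.Dict.insert a w b) < pvFree clauses a := by
  apply pvFilter_lt _ _ w _ hw
  · simp [hn]
  · simp [PySem.Dict.get?_insert_self]
  · intro y hy
    rw [PySem.Dict.get?_insert] at hy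
    split at hy
    · simp at hy
    · exact hy

lemma pvA_scan_mem (a : PySem.Dict Int Bool) :
    ∀ (cl acc u : List Int) (s : Bool), pvA_scan a acc cl = (u, s) →
    ∀ l ∈ u, l ∈ acc ∨ l ∈ cl := by
  intro cl
  induction cl with
  | nil =>
    intro acc u s h l hl
    simp only [pvA_scan] at h
    cases h; exact Or.inl hl
  | cons lit rest ih =>
    intro acc u s h l hl
    simp only [pvA_scan] at h
    cases hg : PySem.Dict.get? a |lit| with
    | some b =>
      rw [hg] at h
      simp only at h
      split at h
      · cases h; exact Or.inl hl
      · rcases ih acc u s h l hl with h' | h'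
        · exact Or.inl h'
        · exact Or.inr (List.mem_cons_of_mem _ h')
    | none =>
      rw [hg] at h
      simp only at h
      rcases ih (acc ++ [lit]) u s h l hl with h' | h'
      · rcases List.mem_append.mp h' with h'' | h''
        · exact Or.inl h''
        · simp at h''; subst h''; exact Or.inr (List.mem_cons_self)
      · exact Or.inr (List.mem_cons_of_mem _ h')

-- a pass never grows the measure, and a pass that reports `changed` from a clean start shrinks it
lemma pvA_pass_free (clauses : List (List Int)) :
    ∀ (L : List (List Int)) (a : PySem.Dict Int Bool) (c : Bool), (∀ cl ∈ L, cl ∈ clauses) →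
    pvFree clauses (pvA_pass a c L).1 ≤ pvFree clauses a ∧
      ((pvA_pass a c L).2.1 = true → c = true ∨ pvFree clauses (pvA_pass a c L).1 < pvFree clauses a) := by
  intro L
  induction L with
  | nil =>
    intro a c _
    simp only [pvA_pass]
    exact ⟨le_refl _, fun h => Or.inl h⟩
  | cons cl rest ih =>
    intro a c hsub
    have hsub' : ∀ x ∈ rest, x ∈ clauses := fun x hx => hsub x (List.mem_cons_of_mem _ hx)
    simp only [pvA_pass]
    rcases hscan : pvA_scan a [] cl with ⟨unset, sat⟩
    cases sat
    · simp only
      split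
      · exact ⟨le_refl _, fun h => Or.inl h⟩
      · split
        · split
          · rename_i hlen0 hlen1 hnone
            obtain ⟨x, hx⟩ := List.length_eq_one_iff.mp hlen1
            have hmem : unset.headI ∈ cl := by
              rcases pvA_scan_mem a cl [] unset false hscan unset.headI
                  (by rw [hx]; simp) with h | h
              · cases h
              · exact h
            have hvars : |unset.headI| ∈ pvVars clauses := by
              unfold pvVars
              exact List.mem_dedup.mpr (List.mem_map.mpr ⟨unset.headI,
                List.mem_flatten.mpr ⟨cl, hsub cl List.mem_cons_self, hmem⟩, rfl⟩)
            have hnone' : PySem.Dict.get? a |unset.headI| = none := by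
              simpa using hnone
            have hlt := pvFree_insert_lt clauses a _ (decide (unset.headI > 0)) hvars hnone'
            obtain ⟨ihle, _⟩ := ih (PySem.Dict.insert a (|unset.headI|) (decide (unset.headI > 0))) true hsub'
            exact ⟨le_trans ihle (le_of_lt hlt), fun _ => Or.inr (lt_of_le_of_lt ihle hlt)⟩
          · exact ih a c hsub'
        · exact ih a c hsub'
    · exact ih a c hsub'

-- the `while changed` loop of `up`
def pvA_up (clauses : List (List Int)) (a : PySem.Dict Int Bool) : PySem.Dict Int Bool × Bool :=
  let r := pvA_pass a false clauses
  if r.2.2 then (r.1, true)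
  else if h : r.2.1 then pvA_up clauses r.1
  else (r.1, false)
termination_by pvFree clauses a
decreasing_by
  rcases pvA_pass_free clauses clauses a false (fun _ h => h) with ⟨_, hlt⟩
  rcases hlt h with h' | h'
  · exact absurd h' (by simp)
  · exact h'

def score_lookahead (clauses : List (List Int)) (n : Int) (current_assign : List (Int × Bool)) : List (Int × Int) :=
  let ca := PySem.Dict.mk current_assign
  let scores := (PySem.List.pyRange 1 (n + 1) 1).foldl (fun (scores : PySem.Dict Int Int) v =>
    if (PySem.Dict.get? ca v).isSome then scores
    else
      let st := [true, false].foldl (fun (st : Int × Bool) val =>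
        if st.2 then st
        else
          let r := pvA_up clauses (PySem.Dict.insert ca v val)
          if r.2 then (n, true)
          else (max st.1 ((r.1.size : Int) - (ca.size : Int) - 1), false)) (0, false)
      scores.insert v st.1) PySem.Dict.empty
  scores.items

-- ===== PORT B =====

inductive PvSt where
  | sat | conflict | big | unit (lit : Int)
deriving Repr, DecidableEq

-- _classify: single scan of a clause; `first` holds the one unassigned literal seen so far
def pvB_classify (a : PySem.Dict Int Bool) : List Int → Option Int → PvSt
  | [], none => .conflict
  | [], some lit => .unit lit
  | lit :: rest, first =>
    match PySem.Dict.get? a |lit| with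
    | none =>
      match first with
      | none => pvB_classify a rest (some lit)
      | some _ => .big
    | some b => if b == decide (lit > 0) then .sat else pvB_classify a rest first

lemma pvB_classify_unit_term (a : PySem.Dict Int Bool) :
    ∀ (cl : List Int) (first : Option Int) (lit : Int), pvB_classify a cl first = .unit lit →
    (lit ∈ cl ∧ PySem.Dict.get? a |lit| = none) ∨ first = some lit := by
  intro cl
  induction cl with
  | nil =>
    intro first lit h
    cases first <;> simp only [pvB_classify] at h
    · cases h
    · cases h; exact Or.inr rfl
  | cons x rest ih =>
    intro first lit h
    simp only [pvB_classify] at h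
    cases hg : PySem.Dict.get? a |x| with
    | none =>
      rw [hg] at h
      cases first with
      | none =>
        simp only at h
        rcases ih (some x) lit h with ⟨h1, h2⟩ | h'
        · exact Or.inl ⟨List.mem_cons_of_mem _ h1, h2⟩
        · cases h'; exact Or.inl ⟨List.mem_cons_self, hg⟩
      | some f => simp only at h; cases h
    | some b =>
      rw [hg] at h
      simp only at h
      split at h
      · cases h
      · rcases ih first lit h with ⟨h1, h2⟩ | h'
        · exact Or.inl ⟨List.mem_cons_of_mem _ h1, h2⟩
        · exact Or.inr h'

-- occurrence index: variable ↦ indices of the clauses it occurs in (one entry per occurrence)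
def pvB_occ (clauses : List (List Int)) : PySem.Dict Int (List Int) :=
  (PySem.List.enumerate clauses 0).foldl (fun occ p =>
    p.2.foldl (fun (occ : PySem.Dict Int (List Int)) lit =>
      occ.modify (|lit|) [] (fun xs => xs ++ [p.1])) occ) PySem.Dict.empty

lemma pvB_pyGetD_cases (clauses : List (List Int)) (i : Int) :
    PySem.List.pyGetD clauses i [] = [] ∨ PySem.List.pyGetD clauses i [] ∈ clauses := by
  unfold PySem.List.pyGetD
  cases h : PySem.List.pyGet? clauses i with
  | none => simp
  | some y =>
    right
    simp only [Option.getD_some]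
    unfold PySem.List.pyGet? PySem.List.pyIdx? at h
    split at h <;>
      (obtain ⟨m, -, h2⟩ := Option.bind_eq_some_iff.mp h; exact List.mem_of_getElem? h2)

-- the `while work` loop of _propagate (FIFO worklist of clause indices)
def pvB_prop (clauses : List (List Int)) (occ : PySem.Dict Int (List Int)) (a : PySem.Dict Int Bool) (work : List Int) : Option (PySem.Dict Int Bool) :=
  match work with
  | [] => some a
  | i :: rest =>
    match h : pvB_classify a (PySem.List.pyGetD clauses i []) none with
    | .conflict => none
    | .unit lit => pvB_prop clauses occ (PySem.Dict.insert a (|lit|) (decide (lit > 0))) (rest ++ PySem.Dict.getD occ (|lit|) [])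
    | .sat => pvB_prop clauses occ a rest
    | .big => pvB_prop clauses occ a rest
termination_by (pvFree clauses a, work.length)
decreasing_by
  · rcases pvB_classify_unit_term a _ none lit h with ⟨hmem, hn⟩ | h'
    · rcases pvB_pyGetD_cases clauses i with hnil | hin
      · rw [hnil] at hmem; cases hmem
      · apply Prod.Lex.left
        apply pvFree_insert_lt
        · exact List.mem_dedup.mpr (List.mem_map.mpr ⟨lit, List.mem_flatten.mpr ⟨_, hin, hmem⟩, rfl⟩)
        · exact hn
    · cases h'
  · apply Prod.Lex.right; simp
  · apply Prod.Lex.right; simp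

def pvB_propagate (clauses : List (List Int)) (occ : PySem.Dict Int (List Int)) (base : PySem.Dict Int Bool) (v : Int) (val : Bool) : Option (PySem.Dict Int Bool) :=
  pvB_prop clauses occ (PySem.Dict.insert base v val) (PySem.List.pyRange 0 clauses.length 1)

def pvB_best (clauses : List (List Int)) (occ : PySem.Dict Int (List Int)) (base : PySem.Dict Int Bool) (n : Int) (v : Int) : Int :=
  match pvB_propagate clauses occ base v true with
  | none => n
  | some at_ =>
    match pvB_propagate clauses occ base v false with
    | none => n
    | some af =>
      max (max 0 ((at_.size : Int) - (base.size : Int) - 1)) ((af.size : Int) - (base.size : Int) - 1)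

def score_lookahead_alt (clauses : List (List Int)) (n : Int) (current_assign : List (Int × Bool)) : List (Int × Int) :=
  let occ := pvB_occ clauses
  let ca := PySem.Dict.mk current_assign
  let scores := (PySem.List.pyRange 1 (n + 1) 1).foldl (fun (scores : PySem.Dict Int Int) v =>
    if (PySem.Dict.get? ca v).isSome then scores
    else scores.insert v (pvB_best clauses occ ca n v)) PySem.Dict.empty
  scores.items

-- ===== PRECONDITION & SPEC =====

-- Pre_ excludes association lists with duplicate keys: they do not represent a Python dict
-- (the argument's declared type), so A never receives them.
def Pre_score_lookahead (clauses : List (List Int)) (n : Int) (current_assign : List (Int × Bool)) : Prop :=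
  (current_assign.map Prod.fst).Nodup

instance (clauses : List (List Int)) (n : Int) (current_assign : List (Int × Bool)) : Decidable (Pre_score_lookahead clauses n current_assign) := by unfold Pre_score_lookahead; infer_instance

def pvWitness_score_lookahead : List (List Int) × Int × (List (Int × Bool)) := ([[1, -2], [-1, 2]], 2, [(1, true)])

def Spec_score_lookahead (clauses : List (List Int)) (n : Int) (current_assign : List (Int × Bool)) (out : List (Int × Int)) : Prop := out = score_lookahead_alt clauses n current_assign
instance (clauses : List (List Int)) (n : Int) (current_assign : List (Int × Bool)) (out : List (Int × Int)) : Decidable (Spec_score_lookahead clauses n current_assign out) := by unfold Spec_score_lookahead; infer_instance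

-- ===== CLAIM (what is proved, stated in full; the proofs are below) =====
def Claim_equal_score_lookahead : Prop := ∀ (clauses : List (List Int)) (n : Int) (current_assign : List (Int × Bool)), Dom_score_lookahead clauses n current_assign → Pre_score_lookahead clauses n current_assign → Spec_score_lookahead clauses n current_assign (score_lookahead clauses n current_assign)

-- ===== LEMMAS AND PROOFS =====

-- an occurrence of literal l is true / false / unassigned under a
def OccT (a : PySem.Dict Int Bool) (l : Int) : Prop := PySem.Dict.get? a |l| = some (decide (l > 0))
def OccF (a : PySem.Dict Int Bool) (l : Int) : Prop := PySem.Dict.get? a |l| = some (!decide (l > 0))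

def unsetL (a : PySem.Dict Int Bool) (cl : List Int) : List Int :=
  cl.filter (fun l => (PySem.Dict.get? a |l|).isNone)

def SatC (a : PySem.Dict Int Bool) (cl : List Int) : Prop := ∃ l ∈ cl, OccT a l
def ConfC (a : PySem.Dict Int Bool) (cl : List Int) : Prop := ∀ l ∈ cl, OccF a l
def ClosedC (clauses : List (List Int)) (a : PySem.Dict Int Bool) : Prop :=
  ∀ cl ∈ clauses, SatC a cl ∨ 2 ≤ (unsetL a cl).length

-- bindings forced by unit propagation from d0
inductive UPC (clauses : List (List Int)) (d0 : PySem.Dict Int Bool) : Int → Bool → Prop where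
  | base (v : Int) (b : Bool) : PySem.Dict.get? d0 v = some b → UPC clauses d0 v b
  | unit (pre post : List Int) (lit : Int) : (pre ++ lit :: post) ∈ clauses →
      (∀ l ∈ pre, UPC clauses d0 (|l|) (!decide (l > 0))) →
      (∀ l ∈ post, UPC clauses d0 (|l|) (!decide (l > 0))) →
      UPC clauses d0 (|lit|) (decide (lit > 0))

def PvExt (x y : PySem.Dict Int Bool) : Prop := ∀ v b, PySem.Dict.get? x v = some b → PySem.Dict.get? y v = some b
def PvInv (clauses : List (List Int)) (d0 a : PySem.Dict Int Bool) : Prop :=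
  ∀ v b, PySem.Dict.get? a v = some b → UPC clauses d0 v b
def PvGood (clauses : List (List Int)) (d0 F : PySem.Dict Int Bool) : Prop := PvExt d0 F ∧ ClosedC clauses F

def UnitOrConf (a : PySem.Dict Int Bool) (cl : List Int) : Prop :=
  ConfC a cl ∨ ∃ lit, unsetL a cl = [lit] ∧ ∀ l ∈ cl, ¬ OccT a l

lemma occF_unset_nil (F : PySem.Dict Int Bool) (cl : List Int) (hall : ∀ l ∈ cl, OccF F l) :
    unsetL F cl = [] := by
  apply List.filter_eq_nil_iff.mpr
  intro l hl
  have := hall l hl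
  unfold OccF at this
  simp [this]

lemma occF_not_sat (F : PySem.Dict Int Bool) (cl : List Int) (hall : ∀ l ∈ cl, OccF F l) :
    ¬ SatC F cl := by
  rintro ⟨l, hl, hoT⟩
  have := hall l hl
  unfold OccT at hoT
  unfold OccF at this
  rw [hoT] at this
  simp at this

lemma occF_closed_false (clauses : List (List Int)) (F : PySem.Dict Int Bool) (cl : List Int)
    (hcl : cl ∈ clauses) (hC : ClosedC clauses F) (hall : ∀ l ∈ cl, OccF F l) : False := by
  rcases hC cl hcl with hsat | hlen
  · exact occF_not_sat F cl hall hsat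
  · rw [occF_unset_nil F cl hall] at hlen
    simp at hlen

lemma upc_sub_good (clauses : List (List Int)) (d0 F : PySem.Dict Int Bool) (hF : PvGood clauses d0 F) :
    ∀ v b, UPC clauses d0 v b → PySem.Dict.get? F v = some b := by
  intro v b h
  induction h with
  | base v b hb => exact hF.1 v b hb
  | unit pre post lit hcl hpre hpost ihpre ihpost =>
    cases hg : PySem.Dict.get? F |lit| with
    | some b' =>
      by_cases hb : b' = decide (lit > 0)
      · rw [hb]
      · exfalso
        apply occF_closed_false clauses F _ hcl hF.2
        intro l hl
        rcases List.mem_append.mp hl with h1 | h2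
        · exact ihpre l h1
        · rcases List.mem_cons.mp h2 with rfl | h3
          · unfold OccF
            rw [hg]
            congr 1
            cases hc : b' <;> cases hd : decide (l > 0) <;> simp_all
          · exact ihpost l h3
    | none =>
      exfalso
      have hunset : unsetL F (pre ++ lit :: post) = [lit] := by
        unfold unsetL
        rw [List.filter_append, List.filter_cons]
        have h1 : pre.filter (fun l => (PySem.Dict.get? F |l|).isNone) = [] := by
          apply List.filter_eq_nil_iff.mpr
          intro l hl
          have := ihpre l hl
          simp [this]
        have h2 : post.filter (fun l => (PySem.Dict.get? F |l|).isNone) = [] := by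
          apply List.filter_eq_nil_iff.mpr
          intro l hl
          have := ihpost l hl
          simp [this]
        simp [h1, h2, hg]
      have hnsat : ¬ SatC F (pre ++ lit :: post) := by
        rintro ⟨l, hl, hoT⟩
        unfold OccT at hoT
        rcases List.mem_append.mp hl with h1 | h2
        · have := ihpre l h1
          rw [hoT] at this
          simp at this
        · rcases List.mem_cons.mp h2 with rfl | h3
          · rw [hoT] at hg; cases hg
          · have := ihpost l h3
            rw [hoT] at this
            simp at this
      rcases hF.2 _ hcl with hsat | hlen
      · exact hnsat hsat
      · rw [hunset] at hlen
        simp at hlen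

lemma conf_no_good (clauses : List (List Int)) (d0 : PySem.Dict Int Bool) (a : PySem.Dict Int Bool)
    (hPvInv : PvInv clauses d0 a) (cl : List Int) (hcl : cl ∈ clauses) (hconf : ConfC a cl) :
    ∀ F, PvGood clauses d0 F → False := by
  intro F hF
  apply occF_closed_false clauses F cl hcl hF.2
  intro l hl
  exact upc_sub_good clauses d0 F hF _ _ (hPvInv _ _ (hconf l hl))

lemma ext_insert (a : PySem.Dict Int Bool) (w : Int) (b : Bool) (h : PySem.Dict.get? a w = none) :
    PvExt a (PySem.Dict.insert a w b) := by
  intro v b' hv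
  rw [PySem.Dict.get?_insert]
  split
  · rename_i hvw; rw [hvw] at hv; rw [hv] at h; cases h
  · exact hv

lemma inv_unit_insert (clauses : List (List Int)) (d0 a : PySem.Dict Int Bool) (hPvInv : PvInv clauses d0 a)
    (cl : List Int) (hcl : cl ∈ clauses) (lit : Int)
    (hu : unsetL a cl = [lit]) (hnT : ∀ l ∈ cl, ¬ OccT a l) :
    PvInv clauses d0 (PySem.Dict.insert a (|lit|) (decide (lit > 0))) := by
  have hfalse : ∀ x ∈ cl, ¬ (PySem.Dict.get? a |x| = none) → PySem.Dict.get? a |x| = some (!decide (x > 0)) := by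
    intro x hx hxs
    cases hgx : PySem.Dict.get? a |x| with
    | none => exact absurd hgx hxs
    | some bx =>
      have hnt := hnT x hx
      unfold OccT at hnt
      rw [hgx] at hnt
      congr 1
      cases hbx : bx <;> cases hd : decide (x > 0) <;> simp_all
  obtain ⟨l1, l2, hdec, hl1, hplit, hfl2⟩ := List.filter_eq_cons_iff.mp hu
  have hl2 : ∀ x ∈ l2, ¬ ((PySem.Dict.get? a |x|).isNone = true) := List.filter_eq_nil_iff.mp hfl2
  intro v b hv
  rw [PySem.Dict.get?_insert] at hv
  split at hv
  · rename_i hvw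
    cases hv
    rw [hvw]
    apply UPC.unit l1 l2 lit (by rw [← hdec]; exact hcl)
    · intro x hx
      have hxf := hfalse x (by rw [hdec]; exact List.mem_append_left _ hx) (by simpa using hl1 x hx)
      exact hPvInv _ _ hxf
    · intro x hx
      have hxf := hfalse x (by rw [hdec]; exact List.mem_append_right _ (List.mem_cons_of_mem _ hx)) (by simpa using hl2 x hx)
      exact hPvInv _ _ hxf
  · exact hPvInv v b hv

lemma unsetL_cons_none (a : PySem.Dict Int Bool) (l : Int) (cl : List Int)
    (hg : PySem.Dict.get? a |l| = none) : unsetL a (l :: cl) = l :: unsetL a cl := by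
  simp [unsetL, hg]

lemma unsetL_cons_some (a : PySem.Dict Int Bool) (l : Int) (cl : List Int) (b : Bool)
    (hg : PySem.Dict.get? a |l| = some b) : unsetL a (l :: cl) = unsetL a cl := by
  simp [unsetL, hg]

lemma pvA_scan_false (a : PySem.Dict Int Bool) :
    ∀ (cl acc u : List Int), pvA_scan a acc cl = (u, false) →
    u = acc ++ unsetL a cl ∧ ∀ l ∈ cl, ¬ OccT a l := by
  intro cl
  induction cl with
  | nil =>
    intro acc u h
    simp only [pvA_scan] at h
    cases h
    simp [unsetL]
  | cons lit rest ih =>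
    intro acc u h
    simp only [pvA_scan] at h
    cases hg : PySem.Dict.get? a |lit| with
    | some b =>
      rw [hg] at h
      simp only at h
      split at h
      · cases h
      · rename_i hne
        obtain ⟨h1, h2⟩ := ih acc u h
        refine ⟨by rw [h1, unsetL_cons_some a lit rest b hg], ?_⟩
        intro l hl
        rcases List.mem_cons.mp hl with rfl | hl'
        · intro hocc
          rw [hocc] at hg
          apply hne
          simp at hg ⊢
          omega
        · exact h2 l hl'
    | none =>
      rw [hg] at h
      simp only at h
      obtain ⟨h1, h2⟩ := ih (acc ++ [lit]) u h
      refine ⟨by rw [h1, unsetL_cons_none a lit rest hg]; simp, ?_⟩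
      intro l hl
      rcases List.mem_cons.mp hl with rfl | hl'
      · intro hocc; rw [hocc] at hg; cases hg
      · exact h2 l hl'

lemma pvA_scan_true (a : PySem.Dict Int Bool) :
    ∀ (cl acc u : List Int), pvA_scan a acc cl = (u, true) → SatC a cl := by
  intro cl
  induction cl with
  | nil => intro acc u h; simp only [pvA_scan] at h; cases h
  | cons lit rest ih =>
    intro acc u h
    simp only [pvA_scan] at h
    cases hg : PySem.Dict.get? a |lit| with
    | some b =>
      rw [hg] at h
      simp only at h
      split at h
      · rename_i heq
        refine ⟨lit, List.mem_cons_self, ?_⟩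
        unfold OccT
        rw [hg]
        simp only [beq_iff_eq] at heq
        rw [heq]
      · obtain ⟨l, hl, ho⟩ := ih acc u h
        exact ⟨l, List.mem_cons_of_mem _ hl, ho⟩
    | none =>
      rw [hg] at h
      simp only at h
      obtain ⟨l, hl, ho⟩ := ih (acc ++ [lit]) u h
      exact ⟨l, List.mem_cons_of_mem _ hl, ho⟩

lemma occF_of_assigned (a : PySem.Dict Int Bool) (l : Int)
    (hs : ¬ (PySem.Dict.get? a |l| = none)) (hnT : ¬ OccT a l) : OccF a l := by
  cases hg : PySem.Dict.get? a |l| with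
  | none => exact absurd hg hs
  | some b =>
    unfold OccT at hnT
    rw [hg] at hnT
    unfold OccF
    rw [hg]
    congr 1
    cases hb : b <;> cases hd : decide (l > 0) <;> simp_all

lemma pvA_pass_changed : ∀ (L : List (List Int)) (a : PySem.Dict Int Bool),
    (pvA_pass a true L).2.1 = true := by
  intro L
  induction L with
  | nil => intro a; simp [pvA_pass]
  | cons cl rest ih =>
    intro a
    simp only [pvA_pass]
    rcases hscan : pvA_scan a [] cl with ⟨unset, sat⟩
    cases sat
    · simp only
      split
      · simp
      · split
        · split
          · exact ih _
          · exact ih a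
        · exact ih a
    · exact ih a

lemma pvA_pass_spec (clauses : List (List Int)) (d0 : PySem.Dict Int Bool) :
    ∀ (L : List (List Int)) (a : PySem.Dict Int Bool) (c : Bool), (∀ cl ∈ L, cl ∈ clauses) →
    PvExt a (pvA_pass a c L).1 ∧
    (PvInv clauses d0 a → PvInv clauses d0 (pvA_pass a c L).1) ∧
    (a.keys.Nodup → (pvA_pass a c L).1.keys.Nodup) ∧
    ((pvA_pass a c L).2.2 = true → PvInv clauses d0 a → ∃ cl ∈ clauses, ConfC (pvA_pass a c L).1 cl) ∧
    ((pvA_pass a c L).2.2 = false → c = false → (pvA_pass a c L).2.1 = false →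
      (pvA_pass a c L).1 = a ∧ ∀ cl ∈ L, SatC a cl ∨ 2 ≤ (unsetL a cl).length) := by
  intro L
  induction L with
  | nil =>
    intro a c _
    simp only [pvA_pass]
    refine ⟨fun v b h => h, fun h => h, fun h => h, by simp, ?_⟩
    intro _ _ _
    exact ⟨by simp, by simp⟩
  | cons cl rest ih =>
    intro a c hsub
    have hsub' : ∀ x ∈ rest, x ∈ clauses := fun x hx => hsub x (List.mem_cons_of_mem _ hx)
    have hclin : cl ∈ clauses := hsub cl List.mem_cons_self
    simp only [pvA_pass]
    rcases hscan : pvA_scan a [] cl with ⟨unset, sat⟩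
    cases sat
    · obtain ⟨hu, hnT⟩ := pvA_scan_false a cl [] unset hscan
      rw [List.nil_append] at hu
      subst hu
      simp only
      split
      · rename_i hlen
        refine ⟨fun v b h => h, fun h => h, fun h => h, ?_, ?_⟩
        · intro _ _
          refine ⟨cl, hclin, ?_⟩
          intro l hl
          apply occF_of_assigned a l ?_ (hnT l hl)
          intro hgn
          have : l ∈ unsetL a cl := by
            unfold unsetL
            exact List.mem_filter.mpr ⟨hl, by simp [hgn]⟩
          rw [List.length_eq_zero_iff.mp hlen] at this
          cases this
        · intro h; cases h
      · split
        · split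
          · rename_i hlen0 hlen1 hnone
            obtain ⟨x, hx⟩ := List.length_eq_one_iff.mp hlen1
            have hhead : (unsetL a cl).headI = x := by rw [hx]; rfl
            have hnone' : PySem.Dict.get? a |(unsetL a cl).headI| = none := by simpa using hnone
            obtain ⟨e1, e2, e3, e4, e5⟩ :=
              ih (PySem.Dict.insert a (|(unsetL a cl).headI|) (decide ((unsetL a cl).headI > 0))) true hsub'
            refine ⟨?_, ?_, ?_, ?_, ?_⟩
            · intro v b h
              exact e1 v b (ext_insert a _ _ hnone' v b h)
            · intro hI
              apply e2
              apply inv_unit_insert clauses d0 a hI cl hclin _ (by rw [hhead, hx]) hnT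
            · intro hnd
              exact e3 (PySem.Dict.nodup_keys_insert a _ _ hnd)
            · intro hconf hI
              apply e4 hconf
              apply inv_unit_insert clauses d0 a hI cl hclin _ (by rw [hhead, hx]) hnT
            · intro _ _ hch
              rw [pvA_pass_changed rest _] at hch
              cases hch
          · rename_i hlen0 hlen1 hnone
            exfalso
            apply hnone
            obtain ⟨x, hx⟩ := List.length_eq_one_iff.mp hlen1
            have hxmem : x ∈ unsetL a cl := by rw [hx]; simp
            have := (List.mem_filter.mp hxmem).2
            rw [hx]
            simpa using this
        · rename_i hlen0 hlen1
          obtain ⟨e1, e2, e3, e4, e5⟩ := ih a c hsub'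
          refine ⟨e1, e2, e3, e4, ?_⟩
          intro h1 h2 h3
          obtain ⟨ha, hall⟩ := e5 h1 h2 h3
          refine ⟨ha, ?_⟩
          intro cl' hcl'
          rcases List.mem_cons.mp hcl' with rfl | h'
          · right; omega
          · exact hall cl' h'
    · have hsat := pvA_scan_true a cl [] unset hscan
      obtain ⟨e1, e2, e3, e4, e5⟩ := ih a c hsub'
      refine ⟨e1, e2, e3, e4, ?_⟩
      intro h1 h2 h3
      obtain ⟨ha, hall⟩ := e5 h1 h2 h3
      refine ⟨ha, ?_⟩
      intro cl' hcl'
      rcases List.mem_cons.mp hcl' with rfl | h'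
      · exact Or.inl hsat
      · exact hall cl' h'

lemma pvA_up_spec (clauses : List (List Int)) (d0 : PySem.Dict Int Bool) :
    ∀ (a : PySem.Dict Int Bool), PvInv clauses d0 a → a.keys.Nodup →
    PvExt a (pvA_up clauses a).1 ∧ PvInv clauses d0 (pvA_up clauses a).1 ∧ (pvA_up clauses a).1.keys.Nodup ∧
    ((pvA_up clauses a).2 = false → ClosedC clauses (pvA_up clauses a).1) ∧
    ((pvA_up clauses a).2 = true → ∀ F, PvGood clauses d0 F → False) := by
  intro a
  induction a using pvA_up.induct clauses with
  | case1 a r hconf =>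
    intro hI hnd
    rw [pvA_up]
    obtain ⟨e1, e2, e3, e4, e5⟩ := pvA_pass_spec clauses d0 clauses a false (fun _ h => h)
    have hconf : (pvA_pass a false clauses).2.2 = true := hconf
    simp only [hconf, if_true]
    refine ⟨e1, e2 hI, e3 hnd, by simp, ?_⟩
    intro _
    obtain ⟨cl, hcl, hc⟩ := e4 hconf hI
    exact conf_no_good clauses d0 _ (e2 hI) cl hcl hc
  | case2 a r hconf hch ih =>
    intro hI hnd
    rw [pvA_up]
    obtain ⟨e1, e2, e3, e4, e5⟩ := pvA_pass_spec clauses d0 clauses a false (fun _ h => h)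
    have hconf : ¬ (pvA_pass a false clauses).2.2 = true := hconf
    have hch : (pvA_pass a false clauses).2.1 = true := hch
    rw [Bool.not_eq_true] at hconf
    simp only [hconf, Bool.false_eq_true, if_false, hch, dif_pos]
    obtain ⟨f1, f2, f3, f4, f5⟩ := ih (e2 hI) (e3 hnd)
    exact ⟨fun v b h => f1 v b (e1 v b h), f2, f3, f4, f5⟩
  | case3 a r hconf hch =>
    intro hI hnd
    rw [pvA_up]
    obtain ⟨e1, e2, e3, e4, e5⟩ := pvA_pass_spec clauses d0 clauses a false (fun _ h => h)
    have hconf : ¬ (pvA_pass a false clauses).2.2 = true := hconf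
    have hch : ¬ (pvA_pass a false clauses).2.1 = true := hch
    rw [Bool.not_eq_true] at hconf hch
    simp only [hconf, hch, Bool.false_eq_true, if_false, dif_neg, not_false_iff]
    obtain ⟨ha, hall⟩ := e5 hconf rfl hch
    refine ⟨e1, e2 hI, e3 hnd, ?_, by simp⟩
    intro _
    rw [ha]
    exact hall

lemma pvB_classify_conflict (a : PySem.Dict Int Bool) :
    ∀ (cl : List Int) (first : Option Int), pvB_classify a cl first = .conflict →
    first = none ∧ ConfC a cl := by
  intro cl
  induction cl with
  | nil =>
    intro first h
    cases first <;> simp only [pvB_classify] at h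
    · exact ⟨rfl, fun l hl => absurd hl (List.not_mem_nil)⟩
    · cases h
  | cons x rest ih =>
    intro first h
    simp only [pvB_classify] at h
    cases hg : PySem.Dict.get? a |x| with
    | none =>
      rw [hg] at h
      cases first with
      | none =>
        simp only at h
        obtain ⟨h1, _⟩ := ih (some x) h
        cases h1
      | some f => simp only at h; cases h
    | some b =>
      rw [hg] at h
      simp only at h
      split at h
      · cases h
      · rename_i hne
        obtain ⟨h1, h2⟩ := ih first h
        refine ⟨h1, ?_⟩
        intro l hl
        rcases List.mem_cons.mp hl with rfl | hl'
        · unfold OccF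
          rw [hg]
          simp only [beq_iff_eq] at hne
          cases hb : b <;> cases hd : decide (l > 0) <;> simp_all
        · exact h2 l hl'

lemma pvB_classify_unit (a : PySem.Dict Int Bool) :
    ∀ (cl : List Int) (first : Option Int) (lit : Int), pvB_classify a cl first = .unit lit →
    (first.toList ++ unsetL a cl = [lit]) ∧ ∀ l ∈ cl, ¬ OccT a l := by
  intro cl
  induction cl with
  | nil =>
    intro first lit h
    cases first <;> simp only [pvB_classify] at h
    · cases h
    · cases h
      exact ⟨by simp [unsetL], fun l hl => absurd hl (List.not_mem_nil)⟩
  | cons x rest ih =>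
    intro first lit h
    simp only [pvB_classify] at h
    cases hg : PySem.Dict.get? a |x| with
    | none =>
      rw [hg] at h
      cases first with
      | none =>
        simp only at h
        obtain ⟨h1, h2⟩ := ih (some x) lit h
        refine ⟨?_, ?_⟩
        · rw [unsetL_cons_none a x rest hg]
          simpa using h1
        · intro l hl
          rcases List.mem_cons.mp hl with rfl | hl'
          · intro hocc; unfold OccT at hocc; rw [hocc] at hg; cases hg
          · exact h2 l hl'
      | some f => simp only at h; cases h
    | some b =>
      rw [hg] at h
      simp only at h
      split at h
      · cases h
      · rename_i hne
        obtain ⟨h1, h2⟩ := ih first lit h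
        refine ⟨by rw [unsetL_cons_some a x rest b hg]; exact h1, ?_⟩
        intro l hl
        rcases List.mem_cons.mp hl with rfl | hl'
        · intro hocc
          unfold OccT at hocc
          rw [hocc] at hg
          simp only [beq_iff_eq] at hne
          simp at hg
          exact hne hg.symm
        · exact h2 l hl'

lemma pvB_classify_sat (a : PySem.Dict Int Bool) :
    ∀ (cl : List Int) (first : Option Int), pvB_classify a cl first = .sat → SatC a cl := by
  intro cl
  induction cl with
  | nil => intro first h; cases first <;> simp only [pvB_classify] at h <;> cases h
  | cons x rest ih =>
    intro first h
    simp only [pvB_classify] at h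
    cases hg : PySem.Dict.get? a |x| with
    | none =>
      rw [hg] at h
      cases first with
      | none =>
        simp only at h
        obtain ⟨l, hl, ho⟩ := ih (some x) h
        exact ⟨l, List.mem_cons_of_mem _ hl, ho⟩
      | some f => simp only at h; cases h
    | some b =>
      rw [hg] at h
      simp only at h
      split at h
      · rename_i heq
        refine ⟨x, List.mem_cons_self, ?_⟩
        unfold OccT
        rw [hg]
        simp only [beq_iff_eq] at heq
        rw [heq]
      · obtain ⟨l, hl, ho⟩ := ih first h
        exact ⟨l, List.mem_cons_of_mem _ hl, ho⟩

lemma pvB_classify_big (a : PySem.Dict Int Bool) :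
    ∀ (cl : List Int) (first : Option Int), pvB_classify a cl first = .big →
    2 ≤ (first.toList ++ unsetL a cl).length := by
  intro cl
  induction cl with
  | nil => intro first h; cases first <;> simp only [pvB_classify] at h <;> cases h
  | cons x rest ih =>
    intro first h
    simp only [pvB_classify] at h
    cases hg : PySem.Dict.get? a |x| with
    | none =>
      rw [hg] at h
      cases first with
      | none =>
        simp only at h
        have := ih (some x) h
        rw [unsetL_cons_none a x rest hg]
        simpa using this
      | some f =>
        rw [unsetL_cons_none a x rest hg]
        simp
    | some b =>
      rw [hg] at h
      simp only at h
      split at h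
      · cases h
      · have := ih first h
        rw [unsetL_cons_some a x rest b hg]
        exact this

lemma pv_foldl_flatMap {σ τ δ : Type} (g : σ → List τ) (f : δ → τ → δ) :
    ∀ (xs : List σ) (acc : δ), (xs.flatMap g).foldl f acc = xs.foldl (fun acc p => (g p).foldl f acc) acc := by
  intro xs
  induction xs with
  | nil => intro acc; simp
  | cons x t ih => intro acc; simp [List.flatMap_cons, List.foldl_append, ih]

lemma pvB_occ_getD (clauses : List (List Int)) (w : Int) :
    PySem.Dict.getD (pvB_occ clauses) w [] =
      (((PySem.List.enumerate clauses 0).flatMap (fun p => p.2.map (fun l => ((|l| : Int), p.1)))).filter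
        (fun q => q.1 == w)).map (·.2) := by
  have h1 : pvB_occ clauses =
      ((PySem.List.enumerate clauses 0).flatMap (fun p => p.2.map (fun l => ((|l| : Int), p.1)))).foldl
        (fun (d : PySem.Dict Int (List Int)) q => d.modify q.1 [] (fun xs => xs ++ [q.2])) PySem.Dict.empty := by
    rw [pv_foldl_flatMap]
    unfold pvB_occ
    congr 1
    funext d p
    rw [List.foldl_map]
  rw [h1, PySem.Dict.getD_foldl_modify_append]
  simp

lemma pvB_occ_sound (clauses : List (List Int)) (w : Int) (i : Int)
    (h : i ∈ PySem.Dict.getD (pvB_occ clauses) w []) : 0 ≤ i ∧ i < (clauses.length : Int) := by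
  rw [pvB_occ_getD] at h
  obtain ⟨q, hq, rfl⟩ := List.mem_map.mp h
  obtain ⟨hqL, _⟩ := List.mem_filter.mp hq
  obtain ⟨p, hp, hqp⟩ := List.mem_flatMap.mp hqL
  obtain ⟨l, _, rfl⟩ := List.mem_map.mp hqp
  obtain ⟨k, hk, rfl⟩ := (PySem.List.mem_enumerate_iff clauses 0 p).mp hp
  simp only
  omega

lemma pvB_occ_complete (clauses : List (List Int)) (j : Nat) (hj : j < clauses.length)
    (l : Int) (hl : l ∈ clauses[j]) : (j : Int) ∈ PySem.Dict.getD (pvB_occ clauses) (|l|) [] := by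
  rw [pvB_occ_getD]
  apply List.mem_map.mpr
  refine ⟨((|l| : Int), (j : Int)), ?_, rfl⟩
  apply List.mem_filter.mpr
  refine ⟨?_, by simp⟩
  apply List.mem_flatMap.mpr
  refine ⟨((j : Int), clauses[j]), ?_, ?_⟩
  · exact (PySem.List.mem_enumerate_iff clauses 0 _).mpr ⟨j, hj, by simp⟩
  · exact List.mem_map.mpr ⟨l, hl, rfl⟩

lemma uoc_untouched (a : PySem.Dict Int Bool) (w : Int) (b : Bool) (cl : List Int)
    (h : ∀ l ∈ cl, |l| ≠ w) : UnitOrConf (PySem.Dict.insert a w b) cl → UnitOrConf a cl := by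
  have hpt : ∀ l ∈ cl, PySem.Dict.get? (PySem.Dict.insert a w b) |l| = PySem.Dict.get? a |l| := by
    intro l hl
    exact PySem.Dict.get?_insert_of_ne a b (h l hl)
  have hu : unsetL (PySem.Dict.insert a w b) cl = unsetL a cl := by
    unfold unsetL
    apply List.filter_congr
    intro l hl
    rw [hpt l hl]
  rintro (hc | ⟨lit, h1, h2⟩)
  · left
    intro l hl
    have := hc l hl
    unfold OccF at this ⊢
    rw [hpt l hl] at this
    exact this
  · right
    refine ⟨lit, by rw [hu] at h1; exact h1, ?_⟩
    intro l hl hoT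
    apply h2 l hl
    unfold OccT at hoT ⊢
    rw [hpt l hl]
    exact hoT

lemma pv_keys_length (x : PySem.Dict Int Bool) : x.keys.length = x.size := by
  simp [PySem.Dict.keys, PySem.Dict.size]

lemma pvB_prop_spec (clauses : List (List Int)) (d0 : PySem.Dict Int Bool) :
    ∀ (a : PySem.Dict Int Bool) (work : List Int), PvInv clauses d0 a → a.keys.Nodup →
    (∀ i ∈ work, 0 ≤ i ∧ i < (clauses.length : Int)) →
    (∀ (j : Nat) (hj : j < clauses.length), UnitOrConf a clauses[j] → (j : Int) ∈ work) →
    (∀ a', pvB_prop clauses (pvB_occ clauses) a work = some a' →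
      PvExt a a' ∧ PvInv clauses d0 a' ∧ a'.keys.Nodup ∧ ClosedC clauses a') ∧
    (pvB_prop clauses (pvB_occ clauses) a work = none → ∀ F, PvGood clauses d0 F → False) := by
  intro a work
  induction a, work using pvB_prop.induct clauses (pvB_occ clauses) with
  | case1 a =>
    intro hI hnd _ hwork
    constructor
    · intro a' ha'
      rw [pvB_prop] at ha'
      cases ha'
      refine ⟨fun v b h => h, hI, hnd, ?_⟩
      intro cl hclmem
      obtain ⟨j, hj, rfl⟩ := List.mem_iff_getElem.mp hclmem
      have hnu : ¬ UnitOrConf a clauses[j] := by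
        intro hu
        have := hwork j hj hu
        cases this
      rcases hlen : (unsetL a clauses[j]).length with _ | n
      · left
        have hnil := List.length_eq_zero_iff.mp hlen
        have hassigned : ∀ l ∈ clauses[j], ¬ (PySem.Dict.get? a |l| = none) := by
          intro l hl hgn
          have : l ∈ unsetL a clauses[j] := List.mem_filter.mpr ⟨hl, by simp [hgn]⟩
          rw [hnil] at this
          cases this
        by_contra hnsat
        apply hnu
        left
        intro l hl
        exact occF_of_assigned a l (hassigned l hl) (fun hT => hnsat ⟨l, hl, hT⟩)
      · cases n with
        | zero =>
          left
          obtain ⟨x, hx⟩ := List.length_eq_one_iff.mp hlen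
          by_contra hnsat
          apply hnu
          right
          exact ⟨x, hx, fun l hl hT => hnsat ⟨l, hl, hT⟩⟩
        | succ m => right; omega
    · intro hcontra
      rw [pvB_prop] at hcontra
      cases hcontra
  | case2 a i rest hcls =>
    intro hI hnd hval hwork
    have hi := hval i List.mem_cons_self
    have hclmem : PySem.List.pyGetD clauses i [] ∈ clauses := by
      have hclgetd : PySem.List.pyGetD clauses i [] = clauses[i.toNat]'(by omega) := by
        rw [PySem.List.pyGetD_of_nonneg clauses [] hi.1]
        exact List.getD_eq_getElem clauses [] (by omega)
      rw [hclgetd]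
      exact List.getElem_mem _
    have hconf := (pvB_classify_conflict a _ none hcls).2
    constructor
    · intro a' ha'
      rw [pvB_prop] at ha'
      split at ha'
      · cases ha'
      · rename_i lit' heq; rw [heq] at hcls; cases hcls
      · rename_i heq; rw [heq] at hcls; cases hcls
      · rename_i heq; rw [heq] at hcls; cases hcls
    · intro _ F hF
      exact conf_no_good clauses d0 a hI _ hclmem hconf F hF
  | case3 a i rest lit hcls ih =>
    intro hI hnd hval hwork
    have hi := hval i List.mem_cons_self
    have hclgetd : PySem.List.pyGetD clauses i [] = clauses[i.toNat]'(by omega) := by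
      rw [PySem.List.pyGetD_of_nonneg clauses [] hi.1]
      exact List.getD_eq_getElem clauses [] (by omega)
    have hclmem : PySem.List.pyGetD clauses i [] ∈ clauses := by
      rw [hclgetd]; exact List.getElem_mem _
    obtain ⟨hu1, hnT⟩ := pvB_classify_unit a _ none lit hcls
    simp only [Option.toList_none, List.nil_append] at hu1
    have hlitmem : lit ∈ PySem.List.pyGetD clauses i [] := by
      have : lit ∈ unsetL a (PySem.List.pyGetD clauses i []) := by rw [hu1]; simp
      exact (List.mem_filter.mp this).1
    have hlitn : PySem.Dict.get? a |lit| = none := by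
      have : lit ∈ unsetL a (PySem.List.pyGetD clauses i []) := by rw [hu1]; simp
      have := (List.mem_filter.mp this).2
      simpa using this
    have hI' := inv_unit_insert clauses d0 a hI _ hclmem lit hu1 hnT
    have hnd' := PySem.Dict.nodup_keys_insert a (|lit|) (decide (lit > 0)) hnd
    have hval' : ∀ x ∈ rest ++ PySem.Dict.getD (pvB_occ clauses) (|lit|) [], 0 ≤ x ∧ x < (clauses.length : Int) := by
      intro x hx
      rcases List.mem_append.mp hx with hx1 | hx2
      · exact hval x (List.mem_cons_of_mem _ hx1)
      · exact pvB_occ_sound clauses _ x hx2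
    have hwork' : ∀ (j : Nat) (hj : j < clauses.length),
        UnitOrConf (PySem.Dict.insert a (|lit|) (decide (lit > 0))) clauses[j] →
        (j : Int) ∈ rest ++ PySem.Dict.getD (pvB_occ clauses) (|lit|) [] := by
      intro j hj huoc
      by_cases hocc : ∃ l ∈ clauses[j], |l| = |lit|
      · obtain ⟨l, hlmem, hleq⟩ := hocc
        apply List.mem_append_right
        have := pvB_occ_complete clauses j hj l hlmem
        rw [hleq] at this
        exact this
      · push_neg at hocc
        have huoc' := uoc_untouched a _ _ clauses[j] hocc huoc
        have hjw := hwork j hj huoc'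
        rcases List.mem_cons.mp hjw with heq | hrest
        · exfalso
          apply hocc lit ?_ rfl
          have hij : i.toNat = j := by omega
          rw [hclgetd, show (clauses[i.toNat]'(by omega)) = clauses[j] from by subst hij; rfl] at hlitmem
          exact hlitmem
        · exact List.mem_append_left _ hrest
    obtain ⟨g1, g2⟩ := ih hI' hnd' hval' hwork'
    constructor
    · intro a' ha'
      rw [pvB_prop] at ha'
      split at ha'
      · rename_i heq; rw [heq] at hcls; cases hcls
      · rename_i lit' heq'
        rw [heq'] at hcls
        cases hcls
        obtain ⟨f1, f2, f3, f4⟩ := g1 a' ha'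
        exact ⟨fun v b h => f1 v b (ext_insert a _ _ hlitn v b h), f2, f3, f4⟩
      · rename_i heq; rw [heq] at hcls; cases hcls
      · rename_i heq; rw [heq] at hcls; cases hcls
    · intro hnone
      rw [pvB_prop] at hnone
      split at hnone
      · rename_i heq; rw [heq] at hcls; cases hcls
      · rename_i lit' heq'
        rw [heq'] at hcls
        cases hcls
        exact g2 hnone
      · rename_i heq; rw [heq] at hcls; cases hcls
      · rename_i heq; rw [heq] at hcls; cases hcls
  | case4 a i rest hcls ih =>
    intro hI hnd hval hwork
    have hsat := pvB_classify_sat a _ none hcls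
    have hwork' : ∀ (j : Nat) (hj : j < clauses.length), UnitOrConf a clauses[j] → (j : Int) ∈ rest := by
      intro j hj huoc
      have hjw := hwork j hj huoc
      rcases List.mem_cons.mp hjw with heq | hrest
      · exfalso
        have hi := hval i List.mem_cons_self
        have : i.toNat = j := by omega
        have hclgetd : PySem.List.pyGetD clauses i [] = clauses[i.toNat]'(by omega) := by
          rw [PySem.List.pyGetD_of_nonneg clauses [] hi.1]
          exact List.getD_eq_getElem clauses [] (by omega)
        rw [hclgetd, show (clauses[i.toNat]'(by omega)) = clauses[j] from by subst this; rfl] at hsat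
        rcases huoc with hc | ⟨lit', hu', hnT'⟩
        · obtain ⟨l, hl, hT⟩ := hsat
          have := hc l hl
          unfold OccT at hT
          unfold OccF at this
          rw [hT] at this
          simp at this
        · obtain ⟨l, hl, hT⟩ := hsat
          exact hnT' l hl hT
      · exact hrest
    obtain ⟨g1, g2⟩ := ih hI hnd (fun x hx => hval x (List.mem_cons_of_mem _ hx)) hwork'
    constructor
    · intro a' ha'
      rw [pvB_prop] at ha'
      split at ha'
      · rename_i heq; rw [heq] at hcls; cases hcls
      · rename_i lit' heq'; rw [heq'] at hcls; cases hcls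
      · exact g1 a' ha'
      · rename_i heq; rw [heq] at hcls; cases hcls
    · intro hnone
      rw [pvB_prop] at hnone
      split at hnone
      · rename_i heq; rw [heq] at hcls; cases hcls
      · rename_i lit' heq'; rw [heq'] at hcls; cases hcls
      · exact g2 hnone
      · rename_i heq; rw [heq] at hcls; cases hcls
  | case5 a i rest hcls ih =>
    intro hI hnd hval hwork
    have hbig := pvB_classify_big a _ none hcls
    simp only [Option.toList_none, List.nil_append] at hbig
    have hwork' : ∀ (j : Nat) (hj : j < clauses.length), UnitOrConf a clauses[j] → (j : Int) ∈ rest := by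
      intro j hj huoc
      have hjw := hwork j hj huoc
      rcases List.mem_cons.mp hjw with heq | hrest
      · exfalso
        have hi := hval i List.mem_cons_self
        have : i.toNat = j := by omega
        have hclgetd : PySem.List.pyGetD clauses i [] = clauses[i.toNat]'(by omega) := by
          rw [PySem.List.pyGetD_of_nonneg clauses [] hi.1]
          exact List.getD_eq_getElem clauses [] (by omega)
        rw [hclgetd, show (clauses[i.toNat]'(by omega)) = clauses[j] from by subst this; rfl] at hbig
        rcases huoc with hc | ⟨lit', hu', hnT'⟩
        · rw [occF_unset_nil a clauses[j] hc] at hbig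
          simp at hbig
        · rw [hu'] at hbig
          simp at hbig
      · exact hrest
    obtain ⟨g1, g2⟩ := ih hI hnd (fun x hx => hval x (List.mem_cons_of_mem _ hx)) hwork'
    constructor
    · intro a' ha'
      rw [pvB_prop] at ha'
      split at ha'
      · rename_i heq; rw [heq] at hcls; cases hcls
      · rename_i lit' heq'; rw [heq'] at hcls; cases hcls
      · rename_i heq; rw [heq] at hcls; cases hcls
      · exact g1 a' ha'
    · intro hnone
      rw [pvB_prop] at hnone
      split at hnone
      · rename_i heq; rw [heq] at hcls; cases hcls
      · rename_i lit' heq'; rw [heq'] at hcls; cases hcls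
      · rename_i heq; rw [heq] at hcls; cases hcls
      · exact g2 hnone

lemma pv_size_eq (x y : PySem.Dict Int Bool) (hx : x.keys.Nodup) (hy : y.keys.Nodup)
    (h : ∀ v b, PySem.Dict.get? x v = some b ↔ PySem.Dict.get? y v = some b) : x.size = y.size := by
  have hk : ∀ v, v ∈ x.keys ↔ v ∈ y.keys := by
    intro v
    constructor <;> intro hv
    · cases hg : PySem.Dict.get? x v with
      | none => exact absurd hv ((PySem.Dict.get?_eq_none_iff_not_mem_keys _ _).mp hg)
      | some b =>
        by_contra hny
        rw [← PySem.Dict.get?_eq_none_iff_not_mem_keys _ _] at hny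
        rw [(h v b).mp hg] at hny
        cases hny
    · cases hg : PySem.Dict.get? y v with
      | none => exact absurd hv ((PySem.Dict.get?_eq_none_iff_not_mem_keys _ _).mp hg)
      | some b =>
        by_contra hnx
        rw [← PySem.Dict.get?_eq_none_iff_not_mem_keys _ _] at hnx
        rw [(h v b).mpr hg] at hnx
        cases hnx
  have hlen : x.keys.length = y.keys.length := by
    rw [← List.toFinset_card_of_nodup hx, ← List.toFinset_card_of_nodup hy]
    congr 1
    ext v
    simp only [List.mem_toFinset]
    exact hk v
  rw [← pv_keys_length, ← pv_keys_length]
  exact hlen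

-- the two propagation engines agree: same conflict verdict, same assignment size
lemma pv_foldl_congr {α β : Type} (f g : α → β → α) (h : ∀ a b, f a b = g a b) :
    ∀ (l : List β) (i : α), l.foldl f i = l.foldl g i := by
  have hfg : f = g := funext fun a => funext (h a)
  intro l i
  rw [hfg]

lemma core_eq (clauses : List (List Int)) (d0 : PySem.Dict Int Bool) (hnd : d0.keys.Nodup) :
    ((pvA_up clauses d0).2 = true → pvB_prop clauses (pvB_occ clauses) d0 (PySem.List.pyRange 0 clauses.length 1) = none) ∧
    ((pvA_up clauses d0).2 = false → ∃ a', pvB_prop clauses (pvB_occ clauses) d0 (PySem.List.pyRange 0 clauses.length 1) = some a' ∧ a'.size = (pvA_up clauses d0).1.size) := by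
  have hI0 : PvInv clauses d0 d0 := fun v b h => UPC.base v b h
  obtain ⟨e1, e2, e3, e4, e5⟩ := pvA_up_spec clauses d0 d0 hI0 hnd
  have hval0 : ∀ i ∈ PySem.List.pyRange 0 clauses.length 1, 0 ≤ i ∧ i < (clauses.length : Int) :=
    fun i hi => PySem.List.mem_pyRange_one.mp hi
  have hwork0 : ∀ (j : Nat) (hj : j < clauses.length), UnitOrConf d0 clauses[j] →
      (j : Int) ∈ PySem.List.pyRange 0 clauses.length 1 := by
    intro j hj _
    apply PySem.List.mem_pyRange_one.mpr
    constructor <;> omega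
  obtain ⟨g1, g2⟩ := pvB_prop_spec clauses d0 d0 (PySem.List.pyRange 0 clauses.length 1) hI0 hnd hval0 hwork0
  constructor
  · intro hA
    cases hB : pvB_prop clauses (pvB_occ clauses) d0 (PySem.List.pyRange 0 clauses.length 1) with
    | none => rfl
    | some a' =>
      exfalso
      obtain ⟨f1, f2, f3, f4⟩ := g1 a' hB
      exact e5 hA a' ⟨f1, f4⟩
  · intro hA
    cases hB : pvB_prop clauses (pvB_occ clauses) d0 (PySem.List.pyRange 0 clauses.length 1) with
    | none =>
      exfalso
      exact g2 hB (pvA_up clauses d0).1 ⟨e1, e4 hA⟩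
    | some a' =>
      refine ⟨a', rfl, ?_⟩
      obtain ⟨f1, f2, f3, f4⟩ := g1 a' hB
      apply pv_size_eq a' (pvA_up clauses d0).1 f3 e3
      intro v b
      constructor
      · intro h
        exact upc_sub_good clauses d0 _ ⟨e1, e4 hA⟩ v b (f2 v b h)
      · intro h
        exact upc_sub_good clauses d0 _ ⟨f1, f4⟩ v b (e2 v b h)

lemma pv_best_eq (clauses : List (List Int)) (n : Int) (ca : PySem.Dict Int Bool)
    (hnd : ca.keys.Nodup) (v : Int) :
    ([true, false].foldl (fun (st : Int × Bool) val =>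
        if st.2 then st
        else
          let r := pvA_up clauses (PySem.Dict.insert ca v val)
          if r.2 then (n, true)
          else (max st.1 ((r.1.size : Int) - (ca.size : Int) - 1), false)) (0, false)).1
      = pvB_best clauses (pvB_occ clauses) ca n v := by
  have hndT := PySem.Dict.nodup_keys_insert ca v true hnd
  have hndF := PySem.Dict.nodup_keys_insert ca v false hnd
  obtain ⟨cT1, cT2⟩ := core_eq clauses (PySem.Dict.insert ca v true) hndT
  obtain ⟨cF1, cF2⟩ := core_eq clauses (PySem.Dict.insert ca v false) hndF
  unfold pvB_best pvB_propagate
  simp only [List.foldl_cons, List.foldl_nil]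
  cases hT : (pvA_up clauses (PySem.Dict.insert ca v true)).2
  · obtain ⟨aT, hBT, hsT⟩ := cT2 hT
    rw [hBT]
    cases hF : (pvA_up clauses (PySem.Dict.insert ca v false)).2
    · obtain ⟨aF, hBF, hsF⟩ := cF2 hF
      rw [hBF]
      simp only [Bool.false_eq_true, if_false]
      rw [hsT, hsF]
    · rw [cF1 hF]
      simp
  · rw [cT1 hT]
    simp

-- ===== VERDICT (by name: the statement is the Claim_ definition above) =====
theorem score_lookahead_spec : Claim_equal_score_lookahead := by
  intro clauses n current_assign _ hpre
  unfold Spec_score_lookahead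
  simp only [score_lookahead, score_lookahead_alt]
  have hnd : (PySem.Dict.mk current_assign).keys.Nodup := by
    simpa [PySem.Dict.keys_mk] using hpre
  congr 1
  apply pv_foldl_congr
  intro s v
  by_cases hs : (PySem.Dict.get? (PySem.Dict.mk current_assign) v).isSome
  · simp [hs]
  · simp only [hs, Bool.false_eq_true, if_false]
    congr 1
    exact pv_best_eq clauses n (PySem.Dict.mk current_assign) hnd v
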